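-- pv_equiv track=rewrite | github.com/Ridealist/CodingTest | Kakao_기출/파일명정렬.py | splitpart
-- ===== SOURCE A (Python) =====
-- def splitpart(word: str):
--     head = ""
--     number = ""
--     num_start = False
--     for c in word:
--         if not c.isdigit() and num_start:
--             break
--
--         if not c.isdigit():
--             head += c
--         if c.isdigit():
--             num_start = True
--             number += c
--
--     return head.lower(), int(number)
-- ===== SOURCE B (Python) =====
-- def splitpart(word):
--     # Two-pointer scan: i = end of the non-digit head, j = end of the digit run;
--     # head/number are slices instead of char-by-char accumulation.
--     n = len(word)
--     i = 0
--     while i < n and not word[i].isdigit():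
--         i += 1
--     j = i
--     while j < n and word[j].isdigit():
--         j += 1
--     return word[:i].lower(), int(word[i:j])
-- ===== Notes on version B (the rewrite author's own statement) =====
-- stated objective: simpler
-- what changed: Replaces the flag-driven character-accumulating loop (num_start flag, break, string concatenation) with two index scans that find the head/number boundaries and return slices; Pre_ excludes digit-free words, where both A and B raise ValueError from int('').
-- outside the precondition, e.g. on splitpart(''): A raises ValueError, B raises ValueError
import Mathlib
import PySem

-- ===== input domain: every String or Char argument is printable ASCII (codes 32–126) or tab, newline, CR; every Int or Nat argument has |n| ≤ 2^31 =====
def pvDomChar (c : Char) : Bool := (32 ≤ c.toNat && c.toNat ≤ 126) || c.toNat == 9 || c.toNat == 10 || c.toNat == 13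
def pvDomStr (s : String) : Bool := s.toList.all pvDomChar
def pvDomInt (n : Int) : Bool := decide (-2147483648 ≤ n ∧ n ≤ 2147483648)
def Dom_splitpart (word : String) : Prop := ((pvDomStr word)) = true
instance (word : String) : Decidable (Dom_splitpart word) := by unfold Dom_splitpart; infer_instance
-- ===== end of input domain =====

-- B replaces A's flag-driven accumulating loop with two index scans and slices (objective: simpler).
-- ===== PORT A =====
-- A's for-loop with its break: state (head, number, num_start); break returns the state.
def splitALoop : List Char → List Char → List Char → Bool → List Char × List Char
  | [], h, n, _ => (h, n)
  | c :: cs, h, n, ns =>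
    if !PySem.Chars.isdigit c && ns then (h, n)
    else splitALoop cs
      (if !PySem.Chars.isdigit c then h ++ [c] else h)
      (if PySem.Chars.isdigit c then n ++ [c] else n)
      (if PySem.Chars.isdigit c then true else ns)

def splitpart (word : String) : String × Int :=
  let r := splitALoop word.toList [] [] false
  -- int(number): ValueError (ofChars? = none) excluded by Pre_splitpart
  (PySem.Str.lower (String.ofList r.1), (PySem.Int.ofChars? r.2).getD 0)

-- ===== PORT B =====
-- while i < n and not p-fails: the two while loops of Source B; s[i]? = some c ↔ i < n with word[i] = c
def scanWhile (s : List Char) (p : Char → Bool) (i : Nat) : Nat :=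
  if h : i < s.length then
    if p s[i] then scanWhile s p (i + 1) else i
  else i
termination_by s.length - i

def splitpart_alt (word : String) : String × Int :=
  let cs := word.toList
  let i := scanWhile cs (fun c => !PySem.Chars.isdigit c) 0
  let j := scanWhile cs PySem.Chars.isdigit i
  -- word[:i] and word[i:j] with 0 ≤ i ≤ j are take/drop (PySem.List.slice_natCast)
  (PySem.Str.lower (String.ofList (cs.take i)), (PySem.Int.ofChars? ((cs.drop i).take (j - i))).getD 0)

-- ===== PRECONDITION & SPEC =====
-- Pre_ excludes digit-free words: there A executes int("") and raises ValueError (B likewise).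
def Pre_splitpart (word : String) : Prop := word.toList.any PySem.Chars.isdigit = true
instance (word : String) : Decidable (Pre_splitpart word) := by unfold Pre_splitpart; infer_instance
def pvWitness_splitpart : String := "F7.png"

def Spec_splitpart (word : String) (out : String × Int) : Prop := out = splitpart_alt word
instance (word : String) (out : String × Int) : Decidable (Spec_splitpart word out) := by unfold Spec_splitpart; infer_instance

-- ===== CLAIM (what is proved, stated in full; the proofs are below) =====
def Claim_equal_splitpart : Prop := ∀ (word : String), Dom_splitpart word → Pre_splitpart word → Spec_splitpart word (splitpart word)

-- ===== LEMMAS AND PROOFS =====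
theorem splitALoop_true (cs : List Char) : ∀ (h n : List Char),
    splitALoop cs h n true = (h, n ++ cs.takeWhile PySem.Chars.isdigit) := by
  induction cs with
  | nil => intro h n; simp [splitALoop]
  | cons c cs ih =>
    intro h n
    by_cases hd : PySem.Chars.isdigit c = true
    · simp [splitALoop, hd, ih, List.takeWhile_cons]
    · simp [splitALoop, hd, List.takeWhile_cons]

theorem splitALoop_false (cs : List Char) : ∀ (h : List Char),
    splitALoop cs h [] false =
      (h ++ cs.takeWhile (fun c => !PySem.Chars.isdigit c),
       (cs.dropWhile (fun c => !PySem.Chars.isdigit c)).takeWhile PySem.Chars.isdigit) := by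
  induction cs with
  | nil => intro h; simp [splitALoop]
  | cons c cs ih =>
    intro h
    by_cases hd : PySem.Chars.isdigit c = true
    · simp [splitALoop, hd, splitALoop_true, List.takeWhile_cons, List.dropWhile_cons]
    · simp [splitALoop, hd, ih, List.takeWhile_cons, List.dropWhile_cons]

theorem scanWhile_eq (s : List Char) (p : Char → Bool) : ∀ (i : Nat),
    scanWhile s p i = i + ((s.drop i).takeWhile p).length := by
  intro i
  induction hfuel : s.length - i using Nat.strong_induction_on generalizing i with
  | _ fuel ih =>
    unfold scanWhile
    by_cases hi : i < s.length
    · have hdrop : s.drop i = s[i] :: s.drop (i + 1) := List.drop_eq_getElem_cons hi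
      rw [dif_pos hi]
      by_cases hp : p s[i] = true
      · have := ih (s.length - (i + 1)) (by omega) (i + 1) rfl
        simp only [hp, if_true, this, hdrop, List.takeWhile_cons, List.length_cons]
        omega
      · rw [if_neg hp, hdrop]
        simp [List.takeWhile_cons, hp]
    · rw [dif_neg hi]
      simp [List.drop_eq_nil_of_le (by omega : s.length ≤ i)]

theorem take_len_takeWhile (p : Char → Bool) (l : List Char) :
    l.take (l.takeWhile p).length = l.takeWhile p := by
  induction l with
  | nil => simp
  | cons c cs ih =>
    by_cases hp : p c = true
    · simp [List.takeWhile_cons, hp, ih]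
    · simp [List.takeWhile_cons, hp]

theorem drop_len_takeWhile (p : Char → Bool) (l : List Char) :
    l.drop (l.takeWhile p).length = l.dropWhile p := by
  induction l with
  | nil => simp
  | cons c cs ih =>
    by_cases hp : p c = true
    · simp [List.takeWhile_cons, List.dropWhile_cons, hp, ih]
    · simp [List.takeWhile_cons, List.dropWhile_cons, hp]

-- ===== VERDICT (by name: the statement is the Claim_ definition above) =====
theorem splitpart_spec : Claim_equal_splitpart := by
  intro word _ _
  unfold Spec_splitpart splitpart splitpart_alt
  set cs := word.toList with hcs
  set nd : Char → Bool := fun c => !PySem.Chars.isdigit c with hnd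
  have hi : scanWhile cs nd 0 = (cs.takeWhile nd).length := by
    simpa using scanWhile_eq cs nd 0
  have hdrop : cs.drop (scanWhile cs nd 0) = cs.dropWhile nd := by
    rw [hi]; exact drop_len_takeWhile nd cs
  have hj : scanWhile cs PySem.Chars.isdigit (scanWhile cs nd 0)
      = scanWhile cs nd 0 + ((cs.dropWhile nd).takeWhile PySem.Chars.isdigit).length := by
    rw [scanWhile_eq cs PySem.Chars.isdigit (scanWhile cs nd 0), hdrop]
  simp only [splitALoop_false, List.nil_append]
  rw [hj, hdrop, hi, Nat.add_sub_cancel_left, take_len_takeWhile, take_len_takeWhile]
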